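-- pv_equiv track=rewrite | github.com/foodisbeast/CSCI203 | hw04/hw4pr1.py | increment
-- ===== SOURCE A (Python) =====
-- def numToBinary(a):
--     add = a%2
--     if a<=1:
--         return str(a)
--     else:
--         return str(numToBinary(a//2) + str(add))
--
-- def binaryToNum(a):
--     if len(a) <= 0:
--         return 0
--     else:
--         return (2**(len(a)-1) * int(a[0])) + binaryToNum(a[1:])
--
-- def increment(a):
--     a = binaryToNum(a)
--     a = a + 1
--     if a > 255:
--         a = 0
--     a = numToBinary(a)
--     while len(a) < 8:
--         a = '0' + a
--     return a
-- ===== SOURCE B (Python) =====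
-- def increment(a):
--     # iterative Horner parse, divmod rebuild, left-pad; return value only
--     num = 0
--     for ch in a:
--         num = num * 2 + int(ch)
--     num += 1
--     if num > 255:
--         num = 0
--     s = str(num % 2)
--     num //= 2
--     while num > 0:
--         s = str(num % 2) + s
--         num //= 2
--     return '0' * (8 - len(s)) + s
-- ===== Notes on version B (the rewrite author's own statement) =====
-- stated objective: simpler
-- what changed: The two recursive helpers (power-weighted recursion on the string tail, recursive string concatenation) are replaced by an inline Horner's-rule fold to parse and an iterative divmod loop plus a single left-pad to rebuild the string.
import Mathlib
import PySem

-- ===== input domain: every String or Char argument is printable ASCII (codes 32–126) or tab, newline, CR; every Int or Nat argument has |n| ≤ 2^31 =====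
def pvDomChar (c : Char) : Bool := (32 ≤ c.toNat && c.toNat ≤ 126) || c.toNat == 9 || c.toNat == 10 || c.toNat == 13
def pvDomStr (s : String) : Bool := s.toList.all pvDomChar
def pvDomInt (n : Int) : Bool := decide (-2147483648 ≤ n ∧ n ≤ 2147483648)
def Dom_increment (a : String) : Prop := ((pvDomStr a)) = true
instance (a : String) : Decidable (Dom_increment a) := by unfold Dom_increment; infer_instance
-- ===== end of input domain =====

-- B replaces the two recursive helpers by an inline Horner-parse fold and a divmod
-- rebuild loop with a single left-pad (objective: simpler decomposition, same cost).

-- int(ch) for a single character (Python raises on non-digits; Pre_ excludes those)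
def pvDigit (c : Char) : Int := (PySem.Int.ofChars? [c]).getD 0

-- ===== PORT A =====
-- helper numToBinary, on List Char (string concatenation = list append)
def numToBinaryA (a : Int) : List Char :=
  -- Python computes add = a % 2 before branching; used only in the else branch
  if a ≤ 1 then PySem.Int.toChars a
  else numToBinaryA (PySem.Int.floordiv a 2) ++ PySem.Int.toChars (PySem.Int.mod a 2)
termination_by a.toNat
decreasing_by
  rename_i h
  rw [PySem.Int.floordiv_eq_ediv_of_pos (by omega)]
  omega

-- helper binaryToNum: 2**(len(a)-1) * int(a[0]) + binaryToNum(a[1:])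
def binaryToNumA : List Char → Int
  | [] => 0
  | c :: rest => 2 ^ ((c :: rest).length - 1) * pvDigit c + binaryToNumA rest

-- while len(a) < 8: a = '0' + a
def padA (l : List Char) : List Char :=
  if l.length < 8 then padA ('0' :: l) else l
termination_by 8 - l.length

def increment (a : String) : String :=
  let n0 := binaryToNumA a.toList
  let n1 := n0 + 1
  let n2 := if n1 > 255 then 0 else n1
  String.ofList (padA (numToBinaryA n2))

-- ===== PORT B =====
-- while num > 0: s = str(num % 2) + s; num //= 2
def toBinB (n : Int) (s : List Char) : List Char :=
  if n > 0 then toBinB (PySem.Int.floordiv n 2) (PySem.Int.toChars (PySem.Int.mod n 2) ++ s)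
  else s
termination_by n.toNat
decreasing_by
  rename_i h
  rw [PySem.Int.floordiv_eq_ediv_of_pos (by omega)]
  omega

def increment_alt (a : String) : String :=
  let num0 := a.toList.foldl (fun n c => n * 2 + pvDigit c) 0
  let num1 := num0 + 1
  let num2 := if num1 > 255 then 0 else num1
  let s := toBinB (PySem.Int.floordiv num2 2) (PySem.Int.toChars (PySem.Int.mod num2 2))
  String.ofList (List.replicate (8 - s.length) '0' ++ s)

-- ===== PRECONDITION & SPEC =====
-- Pre_ excludes strings containing a non-digit character, on which Python A raises
-- ValueError in int(a[0]) (and B raises the same way).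
def Pre_increment (a : String) : Prop :=
  (a.toList.all fun c => 48 ≤ c.toNat && c.toNat ≤ 57) = true
instance (a : String) : Decidable (Pre_increment a) := by unfold Pre_increment; infer_instance

def pvWitness_increment : String := "1"

def Spec_increment (a : String) (out : String) : Prop := out = increment_alt a
instance (a : String) (out : String) : Decidable (Spec_increment a out) := by unfold Spec_increment; infer_instance

-- ===== CLAIM (what is proved, stated in full; the proofs are below) =====
def Claim_equal_increment : Prop := ∀ (a : String), Dom_increment a → Pre_increment a → Spec_increment a (increment a)

-- ===== LEMMAS AND PROOFS =====

lemma pvDigit_val (c : Char) (h1 : 48 ≤ c.toNat) (h2 : c.toNat ≤ 57) :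
    pvDigit c = (c.toNat : Int) - 48 := by
  have e : c = Char.ofNat c.toNat := (Char.ofNat_toNat c).symm
  unfold pvDigit
  rw [e]
  set n := c.toNat with hn
  interval_cases n <;> decide

lemma binaryToNumA_nonneg (l : List Char) :
    (l.all fun c => 48 ≤ c.toNat && c.toNat ≤ 57) = true → 0 ≤ binaryToNumA l := by
  induction l with
  | nil => intro _; simp [binaryToNumA]
  | cons c rest ih =>
    intro h
    rw [List.all_cons, Bool.and_eq_true] at h
    obtain ⟨hc', hrest⟩ := h
    simp only [decide_eq_true_eq, Bool.and_eq_true] at hc'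
    have hd : pvDigit c = (c.toNat : Int) - 48 := pvDigit_val c hc'.1 hc'.2
    have h0 : (0:Int) ≤ pvDigit c := by rw [hd]; omega
    have h1 : (0:Int) ≤ 2 ^ ((c :: rest).length - 1) := by positivity
    have h2 := ih hrest
    simp only [binaryToNumA]
    nlinarith

-- Horner's-rule fold computes A's weighted sum
lemma horner_eq (l : List Char) (n : Int) :
    l.foldl (fun n c => n * 2 + pvDigit c) n = n * 2 ^ l.length + binaryToNumA l := by
  induction l generalizing n with
  | nil => simp [binaryToNumA]
  | cons c rest ih =>
    simp only [List.foldl_cons, binaryToNumA, List.length_cons]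
    rw [ih]
    have hlen : rest.length + 1 - 1 = rest.length := by omega
    rw [hlen]
    ring

-- B's divmod rebuild loop produces A's recursive binary string (as a difference list)
lemma toBinB_eq (k : Nat) (n : Int) (s : List Char) (hk : n.toNat ≤ k) (hn : 0 ≤ n) :
    toBinB (PySem.Int.floordiv n 2) (PySem.Int.toChars (PySem.Int.mod n 2) ++ s)
      = numToBinaryA n ++ s := by
  induction k generalizing n s with
  | zero =>
    have h0 : n = 0 := by omega
    subst h0
    rw [toBinB, if_neg (by decide)]
    rw [numToBinaryA, if_pos (by decide), show PySem.Int.mod 0 2 = (0:Int) from by decide]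
  | succ k ih =>
    by_cases h1 : n ≤ 1
    · have h01 : n = 0 ∨ n = 1 := by omega
      rcases h01 with h | h <;> subst h
      · rw [toBinB, if_neg (by decide)]
        rw [numToBinaryA, if_pos (by decide), show PySem.Int.mod 0 2 = (0:Int) from by decide]
      · rw [toBinB, if_neg (by decide)]
        rw [numToBinaryA, if_pos (by decide), show PySem.Int.mod 1 2 = (1:Int) from by decide]
    · have hdiv : PySem.Int.floordiv n 2 = n / 2 := PySem.Int.floordiv_eq_ediv_of_pos (by omega)
      rw [toBinB, if_pos (by rw [hdiv]; omega)]
      have hrec := ih (PySem.Int.floordiv n 2) (PySem.Int.toChars (PySem.Int.mod n 2) ++ s)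
        (by rw [hdiv]; omega) (by rw [hdiv]; omega)
      rw [hrec]
      conv_rhs => rw [numToBinaryA]
      rw [if_neg h1, List.append_assoc]

-- the pad-one-at-a-time loop is a single replicate-prepend
lemma padA_eq (l : List Char) : padA l = List.replicate (8 - l.length) '0' ++ l := by
  by_cases h : l.length < 8
  · rw [padA, if_pos h]
    have := padA_eq ('0' :: l)
    rw [this]
    simp only [List.length_cons]
    have h8 : 8 - l.length = (8 - (l.length + 1)) + 1 := by omega
    rw [h8, List.replicate_succ', List.append_assoc]
    rfl
  · rw [padA, if_neg h]
    have : 8 - l.length = 0 := by omega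
    simp [this]
termination_by 8 - l.length

-- ===== VERDICT (by name: the statement is the Claim_ definition above) =====
theorem increment_spec : Claim_equal_increment := by
  intro a _ hpre
  unfold Spec_increment increment increment_alt
  simp only
  rw [horner_eq]
  simp only [zero_mul, zero_add]
  set n0 := binaryToNumA a.toList with hn0
  have hnn : 0 ≤ n0 := binaryToNumA_nonneg a.toList hpre
  set n2 : Int := if n0 + 1 > 255 then 0 else n0 + 1 with hn2
  have hnn2 : 0 ≤ n2 := by rw [hn2]; split <;> omega
  have h := toBinB_eq n2.toNat n2 [] (le_refl _) hnn2
  rw [List.append_nil, List.append_nil] at h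
  rw [h, padA_eq]
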